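-- pv_equiv track=rewrite | github.com/Jackwmtr/radwareDumper | dpwall.py | gen_brand_new_dp_cfg
-- ===== SOURCE A (Python) =====
-- def gen_brand_new_dp_cfg(iplist):
--     """generates text config out of list - with masks.
--     Returns two strings. First is for adding config and second - for deleting"""
--
--     chunks = [iplist[x:x + 250] for x in range(0, len(iplist), 250)]
--     cfg_str_classes_add, cfg_str_blcktables_add, cfg_str_classes_del, cfg_str_blcktables_del = "", "", "", ""
--     for classnum in range(0, len(chunks)):
--         cfgline = f'dp block-allow-lists blocklist table create APW_SCRIPT_{classnum} -sn APW_SCRIPT_{classnum}\n'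
--         cfg_str_blcktables_add = cfg_str_blcktables_add + cfgline
--         cfgline = f'dp block-allow-lists blocklist table del APW_SCRIPT_{classnum}\n'
--         cfg_str_blcktables_del = cfg_str_blcktables_del + cfgline
--         for ipnum in range(0, len(chunks[classnum])):
--             if chunks[classnum][ipnum].find("/") != -1:  # see if network mask exists and substring it.
--                 netaddr = chunks[classnum][ipnum][:chunks[classnum][ipnum].find("/")]
--                 prefixlen = chunks[classnum][ipnum][chunks[classnum][ipnum].find("/") + 1:]
--             else:  # if there is no "/" in item - assume that prefix len is 32
--                 netaddr = chunks[classnum][ipnum]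
--                 prefixlen = 32
--             cfgline = f'classes modify network create APW_SCRIPT_{classnum} {ipnum} -a {netaddr} -s {prefixlen}\n'
--             cfg_str_classes_add = cfg_str_classes_add + cfgline
--             cfgline = f'classes modify network del APW_SCRIPT_{classnum} {ipnum}\n'
--             cfg_str_classes_del = cfg_str_classes_del + cfgline
--     cfg_str_add = cfg_str_classes_add + cfg_str_blcktables_add
--     cfg_str_del = cfg_str_classes_del + cfg_str_blcktables_del
--     cfg_str = "===ADD SECTION===\n" + cfg_str_add + "===DELETE SECTION===\n" + cfg_str_del + "\n"
--     return (cfg_str_add, cfg_str_del)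
-- ===== SOURCE B (Python) =====
-- def gen_brand_new_dp_cfg(iplist):
--     """generates text config out of list - with masks.
--     Returns two strings. First is for adding config and second - for deleting"""
--
--     # two separate passes, no chunk list: block-table count in closed form,
--     # per-IP lines from a flat enumerate with divmod
--     nblocks = (len(iplist) + 249) // 250
--     blk_add = ""
--     blk_del = ""
--     for c in range(nblocks):
--         blk_add += f'dp block-allow-lists blocklist table create APW_SCRIPT_{c} -sn APW_SCRIPT_{c}\n'
--         blk_del += f'dp block-allow-lists blocklist table del APW_SCRIPT_{c}\n'
--     cls_add = ""
--     cls_del = ""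
--     for i, ip in enumerate(iplist):
--         classnum, ipnum = divmod(i, 250)
--         slash = ip.find("/")
--         netaddr, prefixlen = (ip, "32") if slash == -1 else (ip[:slash], ip[slash + 1:])
--         cls_add += f'classes modify network create APW_SCRIPT_{classnum} {ipnum} -a {netaddr} -s {prefixlen}\n'
--         cls_del += f'classes modify network del APW_SCRIPT_{classnum} {ipnum}\n'
--     return (cls_add + blk_add, cls_del + blk_del)
-- ===== Notes on version B (the rewrite author's own statement) =====
-- stated objective: simpler
-- what changed: Replaces A's single interleaved loop over a precomputed list of 250-element slices (four accumulators, nested indexing) by two independent passes: block-table lines from a closed-form block count ceil(n/250), and per-IP class lines from one flat enumerate over the input with divmod(i, 250) deriving class and position.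
import Mathlib
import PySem

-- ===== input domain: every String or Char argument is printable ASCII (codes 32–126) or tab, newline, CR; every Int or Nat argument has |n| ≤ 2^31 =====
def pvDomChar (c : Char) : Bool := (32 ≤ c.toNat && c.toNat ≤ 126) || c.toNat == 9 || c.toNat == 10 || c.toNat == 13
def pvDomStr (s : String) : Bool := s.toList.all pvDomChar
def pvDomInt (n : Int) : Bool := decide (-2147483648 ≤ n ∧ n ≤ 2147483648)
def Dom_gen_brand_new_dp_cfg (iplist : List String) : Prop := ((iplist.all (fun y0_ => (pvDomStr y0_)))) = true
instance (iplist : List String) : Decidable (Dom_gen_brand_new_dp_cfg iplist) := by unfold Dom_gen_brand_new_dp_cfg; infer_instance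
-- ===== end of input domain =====

-- B replaces A's single interleaved loop over a materialised list of 250-element slices by
-- two independent passes: block-table lines from a closed-form block count, per-IP class
-- lines from one flat enumerate with divmod(i, 250); same return value, simpler decomposition.

-- ===== PORT A =====
-- literal transliteration of A: build the 250-chunk slice list, then one interleaved loop
-- over chunk numbers with four string accumulators and an inner loop over the chunk.
-- (Python's integer prefixlen 32 is rendered by the f-string as "32"; ported as that string.)

-- A-side helper: the body of A's inner `for ipnum in range(...)` loop
def pvAInner (classnum : Int) (chunk : List String) (acc2 : String × String) (ipnum : Int) :
    String × String :=
  let s := PySem.List.pyGetD chunk ipnum ""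
  let f := PySem.Str.find s "/"
  let netaddr := if f ≠ -1 then PySem.Str.slice s none (some f) else s
  let prefixlen := if f ≠ -1 then PySem.Str.slice s (some (f + 1)) none else "32"
  (acc2.1 ++ "classes modify network create APW_SCRIPT_" ++ PySem.Int.toStr classnum ++
     " " ++ PySem.Int.toStr ipnum ++ " -a " ++ netaddr ++ " -s " ++ prefixlen ++ "\n",
   acc2.2 ++ "classes modify network del APW_SCRIPT_" ++ PySem.Int.toStr classnum ++
     " " ++ PySem.Int.toStr ipnum ++ "\n")

-- A-side helper: the body of A's outer `for classnum in range(...)` loop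
-- (state = (cls_add, blk_add, cls_del, blk_del))
def pvAStep (chunks : List (List String))
    (acc : String × String × String × String) (classnum : Int) :
    String × String × String × String :=
  let ba := acc.2.1 ++ "dp block-allow-lists blocklist table create APW_SCRIPT_" ++
            PySem.Int.toStr classnum ++ " -sn APW_SCRIPT_" ++ PySem.Int.toStr classnum ++ "\n"
  let bd := acc.2.2.2 ++ "dp block-allow-lists blocklist table del APW_SCRIPT_" ++
            PySem.Int.toStr classnum ++ "\n"
  let chunk := PySem.List.pyGetD chunks classnum []
  let inner :=
    (PySem.List.pyRange 0 (chunk.length : Int) 1).foldl (pvAInner classnum chunk)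
      (acc.1, acc.2.2.1)
  (inner.1, ba, inner.2, bd)

def gen_brand_new_dp_cfg (iplist : List String) : String × String :=
  let chunks : List (List String) :=
    (PySem.List.pyRange 0 (iplist.length : Int) 250).map
      (fun x => PySem.List.slice iplist (some x) (some (x + 250)))
  let r := (PySem.List.pyRange 0 (chunks.length : Int) 1).foldl (pvAStep chunks)
      ("", "", "", "")
  (r.1 ++ r.2.1, r.2.2.1 ++ r.2.2.2)

-- ===== PORT B =====
-- transliteration of B: closed-form block count, one pass for the block-table lines,
-- one flat pass over enumerate(iplist) with divmod(i, 250) for the per-IP class lines.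

-- B-side helper: body of B's first loop (state = (blk_add, blk_del))
def pvBBlkStep (acc : String × String) (c : Int) : String × String :=
  (acc.1 ++ "dp block-allow-lists blocklist table create APW_SCRIPT_" ++
     PySem.Int.toStr c ++ " -sn APW_SCRIPT_" ++ PySem.Int.toStr c ++ "\n",
   acc.2 ++ "dp block-allow-lists blocklist table del APW_SCRIPT_" ++
     PySem.Int.toStr c ++ "\n")

-- B-side helper: body of B's second loop (state = (cls_add, cls_del))
def pvBClsStep (acc : String × String) (p : Int × String) : String × String :=
  let classnum := PySem.Int.floordiv p.1 250
  let ipnum := PySem.Int.mod p.1 250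
  let slash := PySem.Str.find p.2 "/"
  let netaddr := if slash = -1 then p.2 else PySem.Str.slice p.2 none (some slash)
  let prefixlen := if slash = -1 then "32" else PySem.Str.slice p.2 (some (slash + 1)) none
  (acc.1 ++ "classes modify network create APW_SCRIPT_" ++ PySem.Int.toStr classnum ++
     " " ++ PySem.Int.toStr ipnum ++ " -a " ++ netaddr ++ " -s " ++ prefixlen ++ "\n",
   acc.2 ++ "classes modify network del APW_SCRIPT_" ++ PySem.Int.toStr classnum ++
     " " ++ PySem.Int.toStr ipnum ++ "\n")

def gen_brand_new_dp_cfg_alt (iplist : List String) : String × String :=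
  let nblocks : Int := PySem.Int.floordiv ((iplist.length : Int) + 249) 250
  let bl := (PySem.List.pyRange 0 nblocks 1).foldl pvBBlkStep ("", "")
  let cl := (PySem.List.enumerate iplist).foldl pvBClsStep ("", "")
  (cl.1 ++ bl.1, cl.2 ++ bl.2)

-- ===== PRECONDITION & SPEC =====
def Spec_gen_brand_new_dp_cfg (iplist : List String) (out : String × String) : Prop := out = gen_brand_new_dp_cfg_alt iplist
instance (iplist : List String) (out : String × String) : Decidable (Spec_gen_brand_new_dp_cfg iplist out) := by unfold Spec_gen_brand_new_dp_cfg; infer_instance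

-- ===== CLAIM (what is proved, stated in full; the proofs are below) =====
def Claim_equal_gen_brand_new_dp_cfg : Prop := ∀ (iplist : List String), Dom_gen_brand_new_dp_cfg iplist → Spec_gen_brand_new_dp_cfg iplist (gen_brand_new_dp_cfg iplist)

-- ===== LEMMAS AND PROOFS =====

-- scalar per-line accumulator steps (proof vocabulary; A's branch shape)
def pvGAdd (a : String) (c i : Int) (s : String) : String :=
  let f := PySem.Str.find s "/"
  let netaddr := if f ≠ -1 then PySem.Str.slice s none (some f) else s
  let prefixlen := if f ≠ -1 then PySem.Str.slice s (some (f + 1)) none else "32"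
  a ++ "classes modify network create APW_SCRIPT_" ++ PySem.Int.toStr c ++
    " " ++ PySem.Int.toStr i ++ " -a " ++ netaddr ++ " -s " ++ prefixlen ++ "\n"

def pvGDel (a : String) (c i : Int) (_s : String) : String :=
  a ++ "classes modify network del APW_SCRIPT_" ++ PySem.Int.toStr c ++
    " " ++ PySem.Int.toStr i ++ "\n"

def pvBlkA (a : String) (c : Int) : String :=
  a ++ "dp block-allow-lists blocklist table create APW_SCRIPT_" ++ PySem.Int.toStr c ++
    " -sn APW_SCRIPT_" ++ PySem.Int.toStr c ++ "\n"

def pvBlkD (a : String) (c : Int) : String :=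
  a ++ "dp block-allow-lists blocklist table del APW_SCRIPT_" ++ PySem.Int.toStr c ++ "\n"

-- the per-class inner fold, as one scalar fold per accumulator
def pvClsFold (g : String → Int → Int → String → String) (c : Int) (chunk : List String)
    (a : String) : String :=
  (PySem.List.enumerate chunk 0).foldl (fun a2 p => g a2 c p.1 p.2) a

theorem pvAInner_eq (c : Int) (chunk : List String) :
    pvAInner c chunk = fun s e =>
      (pvGAdd s.1 c e (PySem.List.pyGetD chunk e ""),
       pvGDel s.2 c e (PySem.List.pyGetD chunk e "")) := rfl

-- A's interleaved four-accumulator loop is four independent scalar loops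
theorem pv_quad (chunks : List (List String)) (R : List Int) :
    ∀ (q : String × String × String × String),
      R.foldl (pvAStep chunks) q =
        (R.foldl (fun a c =>
            pvClsFold pvGAdd c (PySem.List.pyGetD chunks c []) a) q.1,
         R.foldl pvBlkA q.2.1,
         R.foldl (fun a c =>
            pvClsFold pvGDel c (PySem.List.pyGetD chunks c []) a) q.2.2.1,
         R.foldl pvBlkD q.2.2.2) := by
  induction R with
  | nil => intro q; rfl
  | cons c R ih =>
      intro q
      have hc : pvAStep chunks q c =
          (pvClsFold pvGAdd c (PySem.List.pyGetD chunks c []) q.1,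
           pvBlkA q.2.1 c,
           pvClsFold pvGDel c (PySem.List.pyGetD chunks c []) q.2.2.1,
           pvBlkD q.2.2.2 c) := by
        simp only [pvAStep, pvClsFold]
        rw [pvAInner_eq,
          PySem.List.foldl_prod_mk
            (f := fun a e => pvGAdd a c e (PySem.List.pyGetD (PySem.List.pyGetD chunks c []) e ""))
            (g := fun a e => pvGDel a c e (PySem.List.pyGetD (PySem.List.pyGetD chunks c []) e ""))]
        simp only [PySem.List.enumerate_eq_map_pyRange (d := ""), List.foldl_map,
          PySem.List.len, pvBlkA, pvBlkD]
      simp only [List.foldl_cons]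
      rw [hc]
      exact ih _

-- B's two pair loops are four scalar loops
theorem pvBBlk_eq : pvBBlkStep = fun s e => (pvBlkA s.1 e, pvBlkD s.2 e) := rfl

theorem pvBCls_eq : pvBClsStep = fun s e =>
    (pvGAdd s.1 (PySem.Int.floordiv e.1 250) (PySem.Int.mod e.1 250) e.2,
     pvGDel s.2 (PySem.Int.floordiv e.1 250) (PySem.Int.mod e.1 250) e.2) := by
  funext s e
  simp only [pvBClsStep, pvGAdd, pvGDel, ite_not]

-- enumerate with a shifted start is a shift of enumerate
theorem pv_enum_shift {α : Type} (xs : List α) (s t : Int) :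
    PySem.List.enumerate xs (s + t) =
      (PySem.List.enumerate xs t).map (fun p => (s + p.1, p.2)) := by
  induction xs generalizing t with
  | nil => simp [PySem.List.enumerate_nil]
  | cons x xs ih =>
      simp only [PySem.List.enumerate_cons, List.map_cons]
      refine congrArg _ ?_
      rw [add_assoc, ih]

-- the heart: chunked per-class iteration = one flat enumerate with divmod
theorem pv_cls_main (g : String → Int → Int → String → String) :
    ∀ (K : Nat) (l : List String) (c0 : Int) (acc : String),
      l.length ≤ 250 * K → 250 * K < l.length + 250 →
      (List.range K).foldl
        (fun (a : String) (k : Nat) =>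
          pvClsFold g (c0 + (k : Int)) ((l.drop (250 * k)).take 250) a) acc
      = (PySem.List.enumerate l (250 * c0)).foldl
          (fun a p => g a (PySem.Int.floordiv p.1 250) (PySem.Int.mod p.1 250) p.2) acc := by
  intro K
  induction K with
  | zero =>
      intro l c0 acc h1 h2
      have : l = [] := List.eq_nil_of_length_eq_zero (by omega)
      subst this
      simp [PySem.List.enumerate_nil]
  | succ K ih =>
      intro l c0 acc h1 h2
      -- the flat fold over the first chunk is the first chunk's class fold
      have htake : (PySem.List.enumerate (l.take 250) (250 * c0)).foldl
            (fun a p => g a (PySem.Int.floordiv p.1 250) (PySem.Int.mod p.1 250) p.2) acc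
          = pvClsFold g c0 (l.take 250) acc := by
        unfold pvClsFold
        rw [show (250 * c0) = 250 * c0 + 0 from by ring, pv_enum_shift (l.take 250) (250 * c0) 0]
        rw [List.foldl_map]
        apply PySem.List.foldl_congr_mem
        intro a p hp
        rcases (PySem.List.mem_enumerate_iff _ _ _).mp hp with ⟨j, hj, rfl⟩
        have hj250 : j < 250 := by
          have := List.length_take_le 250 l
          omega
        simp only [zero_add]
        have hfd : PySem.Int.floordiv (250 * c0 + (j : Int)) 250 = c0 := by
          rw [PySem.Int.floordiv_eq_iff_of_pos (by norm_num)]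
          have h0 : (0 : Int) ≤ (j : Int) := Int.natCast_nonneg j
          have hlt : (j : Int) < 250 := by exact_mod_cast hj250
          constructor <;> nlinarith
        have hmd : PySem.Int.mod (250 * c0 + (j : Int)) 250 = (j : Int) := by
          rw [PySem.Int.mod_eq_emod_of_pos (by norm_num)]
          have hlt : (j : Int) < 250 := by exact_mod_cast hj250
          omega
        rw [hfd, hmd]
      -- split the RHS at the first chunk
      conv_rhs => rw [← List.take_append_drop 250 l, PySem.List.enumerate_append, List.foldl_append]
      rw [htake]
      -- the tail is empty, or it starts exactly at index 250*(c0+1)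
      have hstart : PySem.List.enumerate (l.drop 250) (250 * c0 + ((l.take 250).length : Int))
          = PySem.List.enumerate (l.drop 250) (250 * (c0 + 1)) := by
        rcases Nat.lt_or_ge l.length 250 with hlt | hle
        · have hd : l.drop 250 = [] := by
            apply List.drop_eq_nil_of_le; omega
          rw [hd, PySem.List.enumerate_nil, PySem.List.enumerate_nil]
        · have : (l.take 250).length = 250 := by rw [List.length_take]; omega
          rw [this]; congr 1; push_cast; ring
      rw [hstart]
      -- LHS: peel chunk 0 and shift the remaining chunks
      rw [List.range_succ_eq_map]
      simp only [List.foldl_cons, List.foldl_map]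
      rw [Nat.cast_zero, add_zero, Nat.mul_zero, List.drop_zero]
      have hstep :
          (fun (a : String) (k : Nat) =>
            pvClsFold g (c0 + ((k + 1 : Nat) : Int)) ((l.drop ((250 * (k + 1) : Nat))).take 250) a)
          = (fun (a : String) (k : Nat) =>
            pvClsFold g ((c0 + 1) + (k : Int)) (((l.drop 250).drop (250 * k)).take 250) a) := by
        funext a k
        rw [List.drop_drop, show 250 * (k + 1) = 250 + 250 * k from by ring,
          show (c0 + ((k + 1 : Nat) : Int)) = (c0 + 1) + (k : Int) from by push_cast; ring]
      rw [hstep]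
      exact ih (l.drop 250) (c0 + 1) _ (by simp only [List.length_drop]; omega)
        (by simp only [List.length_drop]; omega)

-- A's outer loop over chunk indices, as a fold over List.range with explicit drop/take chunks
theorem pv_A_cls (g : String → Int → Int → String → String) (l : List String) (acc : String)
    (K : Nat)
    (hK : ((PySem.List.pyRange 0 (l.length : Int) 250).map
      (fun x => PySem.List.slice l (some x) (some (x + 250)))).length = K) :
    (PySem.List.pyRange 0 (K : Int) 1).foldl
      (fun a c => pvClsFold g c
        (PySem.List.pyGetD ((PySem.List.pyRange 0 (l.length : Int) 250).map
          (fun x => PySem.List.slice l (some x) (some (x + 250)))) c []) a) acc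
    = (List.range K).foldl
        (fun (a : String) (k : Nat) =>
          pvClsFold g ((0 : Int) + (k : Int)) ((l.drop (250 * k)).take 250) a) acc := by
  rw [PySem.List.pyRange_one]
  simp only [sub_zero, Int.toNat_natCast]
  rw [List.foldl_map]
  apply PySem.List.foldl_congr_mem
  intro a k hk
  have hkK : k < K := List.mem_range.mp hk
  congr 1
  rw [zero_add, PySem.List.pyGetD_natCast]
  rw [List.getD_eq_getElem _ _ (by rw [hK]; exact hkK)]
  simp only [PySem.List.pyRange_of_pos 0 (l.length : Int) (by norm_num : (0:Int) < 250),
    List.getElem_map, List.getElem_range]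
  simp only [zero_add]
  rw [show (250 * ((k : Nat) : Int)) = (((250 * k : Nat) : Nat) : Int) from by push_cast; ring]
  rw [show (((250 * k : Nat) : Int) + 250) = (((250 * k : Nat) : Int) + ((250 : Nat) : Int)) from by
    norm_num]
  rw [PySem.List.slice_natCast_add]

theorem gen_brand_new_dp_cfg_spec : Claim_equal_gen_brand_new_dp_cfg := by
  intro l _
  unfold Spec_gen_brand_new_dp_cfg
  simp only [gen_brand_new_dp_cfg, gen_brand_new_dp_cfg_alt]
  have hK : ((PySem.List.pyRange 0 (l.length : Int) 250).map
      (fun x => PySem.List.slice l (some x) (some (x + 250)))).length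
      = (l.length + 249) / 250 := by
    rw [List.length_map, PySem.List.pyRange_of_pos 0 (l.length : Int) (by norm_num)]
    rw [List.length_map, List.length_range]
    split_ifs with h
    · omega
    · omega
  have hnb : PySem.Int.floordiv ((l.length : Int) + 249) 250
      = (((l.length + 249) / 250 : Nat) : Int) := by
    rw [PySem.Int.floordiv_eq_ediv_of_pos (by norm_num)]
    omega
  rw [pv_quad, hK, hnb, pvBBlk_eq, pvBCls_eq]
  rw [PySem.List.foldl_prod_mk (f := pvBlkA) (g := pvBlkD)]
  rw [PySem.List.foldl_prod_mk
    (f := fun (s : String) (e : Int × String) =>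
      pvGAdd s (PySem.Int.floordiv e.1 250) (PySem.Int.mod e.1 250) e.2)
    (g := fun (s : String) (e : Int × String) =>
      pvGDel s (PySem.Int.floordiv e.1 250) (PySem.Int.mod e.1 250) e.2)]
  dsimp only
  have hcls := fun g => pv_A_cls g l "" ((l.length + 249) / 250) hK
  rw [hcls pvGAdd, hcls pvGDel]
  have hmain := fun g => pv_cls_main g ((l.length + 249) / 250) l 0 "" (by omega) (by omega)
  simp only [zero_add] at hmain ⊢
  rw [hmain pvGAdd, hmain pvGDel]
  rw [show (250 * (0 : Int)) = 0 from by ring]
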